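-- pv_equiv track=rewrite | github.com/nathnaeltk/competitive-programming | C_Secret_Sport.py | decode_intercepted_string
-- ===== SOURCE A (Python) =====
-- def decode_intercepted_string(s):
--     decoded = []
--     for char in s:
--         if char == '<':
--             if decoded:
--                 decoded.pop()
--         else:
--             decoded.append(char)
--     return ''.join(decoded)
-- ===== SOURCE B (Python) =====
-- def decode_intercepted_string(s):
--     skip = 0
--     out = []
--     for ch in reversed(s):
--         if ch == '<':
--             skip += 1
--         elif skip:
--             skip -= 1
--         else:
--             out.append(ch)
--     return ''.join(reversed(out))
-- ===== Notes on version B (the rewrite author's own statement) =====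
-- stated objective: alternative
-- what changed: Replaces the forward stack with push/pop by a single backward pass keeping only an integer skip counter, collecting survivors and reversing them at the end.
import Mathlib
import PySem

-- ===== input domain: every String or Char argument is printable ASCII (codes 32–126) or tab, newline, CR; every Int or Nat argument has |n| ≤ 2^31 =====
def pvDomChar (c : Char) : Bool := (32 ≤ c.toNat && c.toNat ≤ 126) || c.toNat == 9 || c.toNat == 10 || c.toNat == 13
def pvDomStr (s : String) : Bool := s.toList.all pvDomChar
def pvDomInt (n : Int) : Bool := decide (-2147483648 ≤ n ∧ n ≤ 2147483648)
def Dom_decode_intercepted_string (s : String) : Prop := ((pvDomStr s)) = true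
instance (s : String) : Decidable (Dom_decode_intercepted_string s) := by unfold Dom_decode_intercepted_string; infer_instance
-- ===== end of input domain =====

-- B replaces A's forward stack (append/pop) by a single backward pass with an integer skip
-- counter; same cost, different traversal (objective: alternative).

-- ===== PORT A =====
-- A: forward pass, decoded as a stack: '<' pops the last kept char (if any), else push.
def decode_intercepted_string (s : String) : String :=
  String.mk (s.toList.foldl
    (fun decoded c => if c = '<' then decoded.dropLast else decoded ++ [c]) [])

-- ===== PORT B =====
-- B: backward pass with a skip counter; survivors are appended and reversed at the end.
def decode_intercepted_string_alt (s : String) : String :=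
  let st := s.toList.reverse.foldl
    (fun (st : Nat × List Char) c =>
      if c = '<' then (st.1 + 1, st.2)
      else if st.1 > 0 then (st.1 - 1, st.2)
      else (st.1, st.2 ++ [c])) (0, [])
  String.mk st.2.reverse

-- ===== PRECONDITION & SPEC =====
def Spec_decode_intercepted_string (s : String) (out : String) : Prop := out = decode_intercepted_string_alt s
instance (s : String) (out : String) : Decidable (Spec_decode_intercepted_string s out) := by unfold Spec_decode_intercepted_string; infer_instance

-- ===== CLAIM (what is proved, stated in full; the proofs are below) =====
def Claim_equal_decode_intercepted_string : Prop := ∀ (s : String), Dom_decode_intercepted_string s → Spec_decode_intercepted_string s (decode_intercepted_string s)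

-- ===== LEMMAS AND PROOFS =====

-- Reference semantics: (pending pops that fall through to any prior stack, decoded output).
def pvDO : List Char → Nat × List Char
  | [] => (0, [])
  | c :: t =>
    let p := pvDO t
    if c = '<' then (p.1 + 1, p.2)
    else if p.1 = 0 then (0, c :: p.2)
    else (p.1 - 1, p.2)

-- A's fold from an arbitrary accumulator: the pending pops eat the tail of the accumulator.
theorem pvA_char (l : List Char) : ∀ acc : List Char,
    l.foldl (fun decoded c => if c = '<' then decoded.dropLast else decoded ++ [c]) acc
      = acc.take (acc.length - (pvDO l).1) ++ (pvDO l).2 := by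
  induction l with
  | nil => intro acc; simp [pvDO]
  | cons c t ih =>
    intro acc
    by_cases hc : c = '<'
    · subst hc
      rw [List.foldl_cons, if_pos rfl, ih, List.dropLast_eq_take, List.take_take]
      have h1 : (pvDO ('<' :: t)).1 = (pvDO t).1 + 1 := by simp [pvDO]
      have h2 : (pvDO ('<' :: t)).2 = (pvDO t).2 := by simp [pvDO]
      rw [h1, h2]
      congr 2
      simp only [List.length_take]
      omega
    · rw [List.foldl_cons, if_neg hc, ih]
      have h1 : pvDO (c :: t)
          = if (pvDO t).1 = 0 then (0, c :: (pvDO t).2)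
            else ((pvDO t).1 - 1, (pvDO t).2) := by
        simp [pvDO, hc]
      rw [h1]
      by_cases hz : (pvDO t).1 = 0
      · rw [if_pos hz, hz, Nat.sub_zero,
          List.take_of_length_le (le_of_eq (by simp))]
        simp
      · rw [if_neg hz]
        have hle : (acc ++ [c]).length - (pvDO t).1 ≤ acc.length := by
          simp; omega
        rw [List.take_append_of_le_length hle]
        congr 2
        simp; omega

-- B's fold from the right computes exactly pvDO (output in reverse).
theorem pvB_char (l : List Char) :
    l.reverse.foldl (fun (st : Nat × List Char) c =>
      if c = '<' then (st.1 + 1, st.2)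
      else if st.1 > 0 then (st.1 - 1, st.2)
      else (st.1, st.2 ++ [c])) (0, [])
      = ((pvDO l).1, (pvDO l).2.reverse) := by
  rw [List.foldl_reverse]
  induction l with
  | nil => simp [pvDO]
  | cons c t ih =>
    simp only [List.foldr_cons, ih, pvDO]
    by_cases hc : c = '<'
    · simp [hc]
    · by_cases hz : (pvDO t).1 = 0
      · simp [hc, hz]
      · have : (pvDO t).1 > 0 := Nat.pos_of_ne_zero hz
        simp [hc, hz, this]

-- ===== VERDICT (by name: the statement is the Claim_ definition above) =====
theorem decode_intercepted_string_spec : Claim_equal_decode_intercepted_string := by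
  intro s _
  show decode_intercepted_string s = decode_intercepted_string_alt s
  unfold decode_intercepted_string decode_intercepted_string_alt
  rw [pvA_char, pvB_char]
  simp
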